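-- pv_equiv track=rewrite | github.com/TBot709/advent-of-code-2023 | test.py | getIsCyclingValues
-- ===== SOURCE A (Python) =====
-- def getIsCyclingValues(l: list) -> bool:
--     n = len(l)
--     for cycle_length in range(1, n):
--         if n % cycle_length == 0:
--             segment = l[:cycle_length]
--             if all(l[i:i+cycle_length] == segment for i in range(cycle_length, n, cycle_length)):
--                 return True
--     return False
-- ===== SOURCE B (Python) =====
-- def _matches(l, p):
--     return l[p:] == l[:len(l) - p]
--
-- def getIsCyclingValues(l: list) -> bool:
--     # Factor n by trial division and test only the maximal proper periods n // q,
--     # one per prime factor q of n, each with a single shift-equality l[p:] == l[:n-p].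
--     n = len(l)
--     if n < 2:
--         return False
--     rem = n
--     d = 2
--     while d * d <= rem:
--         if rem % d == 0:
--             if _matches(l, n // d):
--                 return True
--             while rem % d == 0:
--                 rem //= d
--         d += 1
--     if rem > 1:
--         if _matches(l, n // rem):
--             return True
--     return False
-- ===== Notes on version B (the rewrite author's own statement) =====
-- stated objective: faster
-- what changed: A scans every candidate period 1..n-1 and compares the list chunk by chunk for each divisor; B factors n by trial division up to sqrt(n) and tests only the maximal proper periods n//q, one per prime factor q, each with a single shift-equality l[p:] == l[:n-p], proved to succeed in exactly the same cases.
import Mathlib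
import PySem

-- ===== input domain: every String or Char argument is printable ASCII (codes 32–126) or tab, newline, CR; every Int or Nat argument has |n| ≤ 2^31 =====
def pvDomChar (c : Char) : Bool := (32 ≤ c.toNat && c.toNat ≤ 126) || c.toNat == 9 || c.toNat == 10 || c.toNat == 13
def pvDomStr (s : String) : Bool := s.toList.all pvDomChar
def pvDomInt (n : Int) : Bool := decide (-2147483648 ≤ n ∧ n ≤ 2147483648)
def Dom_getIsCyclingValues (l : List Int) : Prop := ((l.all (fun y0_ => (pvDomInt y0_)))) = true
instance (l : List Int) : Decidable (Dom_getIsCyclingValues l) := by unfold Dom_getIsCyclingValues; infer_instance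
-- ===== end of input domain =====

-- B factors n by trial division and tests only the maximal proper periods n // q, one per
-- prime factor q of n, each with a single shift-equality l[p:] == l[:n-p], instead of A's
-- chunk-by-chunk comparison for every divisor; candidate-set equivalence is proved below.

-- ===== PORT A =====
-- inner check: all(l[i:i+cycle_length] == segment for i in range(cycle_length, n, cycle_length))
def pvASeg (l : List Int) (p : Int) : Bool :=
  (PySem.List.pyRange p (l.length : Int) p).all (fun i =>
    PySem.List.slice l (some i) (some (i + p)) == PySem.List.slice l (some 0) (some p))

def getIsCyclingValues (l : List Int) : Bool :=
  (PySem.List.pyRange 1 (l.length : Int) 1).any (fun p =>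
    PySem.Int.mod (l.length : Int) p == 0 && pvASeg l p)

-- ===== PORT B =====
-- _matches(l, p): l[p:] == l[:len(l)-p]
def pvBChk (l : List Int) (p : Nat) : Bool :=
  PySem.List.slice l (some (p : Int)) none ==
    PySem.List.slice l none (some ((l.length : Int) - (p : Int)))

-- inner while: while rem % d == 0: rem //= d
-- (the dite guard only makes the recursion total; it holds at every call site)
def pvStrip (rem d : Nat) : Nat :=
  if _h : 2 ≤ d ∧ 0 < rem ∧ rem % d = 0 then pvStrip (rem / d) d else rem
termination_by rem
decreasing_by exact Nat.div_lt_self _h.2.1 (by omega)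

-- cited by pvBLoop's decreasing_by
theorem pvStrip_le (rem d : Nat) : pvStrip rem d ≤ rem := by
  induction rem using Nat.strong_induction_on with
  | _ rem ih =>
    rw [pvStrip]
    split
    · next h =>
      have hlt : rem / d < rem := Nat.div_lt_self h.2.1 (by omega)
      exact le_trans (ih _ hlt) (le_of_lt hlt)
    · exact le_refl rem

-- while d * d <= rem: if rem % d == 0: (return True on match of period n//d; strip d); d += 1
-- then: if rem > 1: test period n//rem
def pvBLoop (l : List Int) (n rem d : Nat) : Bool :=
  if h : d * d ≤ rem then
    (if rem % d = 0 then
      (if pvBChk l (n / d) = true then true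
       else pvBLoop l n (pvStrip rem d) (d + 1))
     else pvBLoop l n rem (d + 1))
  else if 1 < rem then pvBChk l (n / rem) else false
termination_by rem + 1 - d
decreasing_by
  all_goals
    have hd : d ≤ rem := by
      rcases Nat.eq_zero_or_pos d with h0 | h1
      · omega
      · exact le_trans (Nat.le_mul_of_pos_right d h1) h
  · have hs := pvStrip_le rem d
    omega
  · omega

def getIsCyclingValues_alt (l : List Int) : Bool :=
  if l.length < 2 then false
  else pvBLoop l l.length l.length 2

-- ===== PRECONDITION & SPEC =====
def Spec_getIsCyclingValues (l : List Int) (out : Bool) : Prop := out = getIsCyclingValues_alt l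
instance (l : List Int) (out : Bool) : Decidable (Spec_getIsCyclingValues l out) := by unfold Spec_getIsCyclingValues; infer_instance

-- ===== CLAIM (what is proved, stated in full; the proofs are below) =====
def Claim_equal_getIsCyclingValues : Prop := ∀ (l : List Int), Dom_getIsCyclingValues l → Spec_getIsCyclingValues l (getIsCyclingValues l)

-- ===== LEMMAS AND PROOFS =====

-- l has pointwise period p on its whole length
def pvGood (l : List Int) (p : Nat) : Prop := ∀ i : Nat, i + p < l.length → l[i]? = l[i + p]?

theorem pvGood_zero (l : List Int) : pvGood l 0 := by
  intro i _
  simp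

-- period p propagates to any multiple of p
theorem pvGood_of_dvd {l : List Int} {p m : Nat} (hg : pvGood l p) (hpm : p ∣ m) :
    pvGood l m := by
  obtain ⟨j, rfl⟩ := hpm
  induction j with
  | zero => simpa using pvGood_zero l
  | succ j ih =>
    intro i hi
    have hmul : p * (j + 1) = p * j + p := by ring
    have e1 : l[i]? = l[i + p * j]? := ih i (by omega)
    have e2 : l[i + p * j]? = l[i + p * j + p]? := hg (i + p * j) (by omega)
    have hidx : i + p * j + p = i + p * (j + 1) := by omega
    rw [e1, e2, hidx]

-- shift-equality (drop p = take (n-p)) characterizes pvGood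
theorem pvShift_iff (l : List Int) (p : Nat) (hpn : p ≤ l.length) :
    (l.drop p = l.take (l.length - p)) ↔ pvGood l p := by
  constructor
  · intro h i hi
    have h2 := congrArg (fun t => t[i]?) h
    simp only [List.getElem?_drop, List.getElem?_take] at h2
    rw [if_pos (by omega)] at h2
    have hidx : p + i = i + p := by omega
    rw [hidx] at h2
    exact h2.symm
  · intro hg
    apply List.ext_getElem?
    intro i
    simp only [List.getElem?_drop, List.getElem?_take]
    by_cases hi : i < l.length - p
    · rw [if_pos hi]
      have h2 := hg i (by omega)
      have hidx : p + i = i + p := by omega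
      rw [hidx]
      exact h2.symm
    · rw [if_neg hi]
      exact List.getElem?_eq_none (by omega)

-- one chunk comparison as a pointwise statement
theorem pvChunk_iff (l : List Int) (p k : Nat) :
    ((l.drop k).take p = l.take p) ↔ ∀ r, r < p → l[k + r]? = l[r]? := by
  constructor
  · intro h r hr
    have h2 := congrArg (fun t => t[r]?) h
    simp only [List.getElem?_take, List.getElem?_drop, if_pos hr] at h2
    exact h2
  · intro h
    apply List.ext_getElem?
    intro r
    simp only [List.getElem?_take, List.getElem?_drop]
    by_cases hr : r < p
    · rw [if_pos hr, if_pos hr]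
      exact h r hr
    · rw [if_neg hr, if_neg hr]

-- multiples of p below n stay below n after one more step, when p ∣ n
theorem pvMulStep {p a n : Nat} (hdvd : p ∣ n) (h : a * p < n) : (a + 1) * p ≤ n := by
  obtain ⟨m, rfl⟩ := hdvd
  have ham : a < m := by
    rcases Nat.lt_or_ge a m with h1 | h2
    · exact h1
    · exfalso
      have h3 := Nat.mul_le_mul_right p h2
      have h4 : p * m = m * p := Nat.mul_comm p m
      omega
  calc (a + 1) * p ≤ m * p := Nat.mul_le_mul_right p (by omega)
    _ = p * m := by ring

-- A's inner all-segments check is exactly pvGood, for a proper divisor period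
theorem pvASeg_iff (l : List Int) (p : Nat) (hp : 1 ≤ p) (hdvd : p ∣ l.length) : pvASeg l (p : Int) = true ↔ pvGood l p := by
  unfold pvASeg
  rw [List.all_eq_true]
  have hmem : ∀ i : Int, i ∈ PySem.List.pyRange (p : Int) (l.length : Int) (p : Int) ↔
      (p : Int) ≤ i ∧ i < (l.length : Int) ∧ (p : Int) ∣ i - (p : Int) := fun i =>
    PySem.List.mem_pyRange_iff_of_pos (by exact_mod_cast hp) i
  constructor
  · -- chunk equalities ⇒ pvGood
    intro h
    have key : ∀ t, t < l.length → l[t]? = l[t % p]? := by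
      intro t ht
      rcases Nat.eq_zero_or_pos (t / p) with hq | hq
      · have hlt : t < p := by
          rcases Nat.lt_or_ge t p with h1 | h2
          · exact h1
          · exfalso
            have := Nat.div_pos h2 (by omega)
            omega
        rw [Nat.mod_eq_of_lt hlt]
      · set k := t / p * p with hkdef
        have hkdvd : p ∣ k := ⟨t / p, by rw [hkdef, Nat.mul_comm]⟩
        have hkt : k ≤ t := Nat.div_mul_le_self t p
        have hkn : k < l.length := by omega
        have hkp : p ≤ k := by
          calc p = 1 * p := (one_mul p).symm
          _ ≤ t / p * p := Nat.mul_le_mul_right p hq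
        have hmemk : ((k : Nat) : Int) ∈
            PySem.List.pyRange (p : Int) (l.length : Int) (p : Int) := by
          rw [hmem]
          refine ⟨by exact_mod_cast hkp, by exact_mod_cast hkn, ?_⟩
          have hd2 : (p : Int) ∣ ((k - p : Nat) : Int) :=
            Int.natCast_dvd_natCast.mpr (Nat.dvd_sub hkdvd (dvd_refl p))
          have hcast : ((k - p : Nat) : Int) = (k : Int) - (p : Int) := by omega
          rw [hcast] at hd2
          exact hd2
        have hbeq := h _ hmemk
        simp only [beq_iff_eq, PySem.List.slice_natCast_add, PySem.List.slice_zero_start,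
          PySem.List.slice_to_natCast] at hbeq
        have hchunk := (pvChunk_iff l p k).mp hbeq
        have hr : t % p < p := Nat.mod_lt t (by omega)
        have hptw := hchunk _ hr
        have ht' : k + t % p = t := by
          have hdm := Nat.div_add_mod t p
          have hcm : p * (t / p) = t / p * p := Nat.mul_comm p (t / p)
          omega
        rw [ht'] at hptw
        exact hptw
    intro i hi
    have h1 : l[i]? = l[i % p]? := key i (by omega)
    have h2 : l[i + p]? = l[(i + p) % p]? := key (i + p) hi
    rw [Nat.add_mod_right] at h2
    rw [h1, h2]
  · -- pvGood ⇒ chunk equalities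
    intro hg i hi
    rw [hmem] at hi
    obtain ⟨hi1, hi2, hi3⟩ := hi
    have hp0 : (0 : Int) ≤ (p : Int) := by exact_mod_cast Nat.zero_le p
    have hi0 : 0 ≤ i := le_trans hp0 hi1
    have hik : i = ((i.toNat : Nat) : Int) := by omega
    set k := i.toNat with hk
    have hkp : p ≤ k := by omega
    have hkn : k < l.length := by omega
    have hkdvdZ : (p : Int) ∣ (k : Int) := by
      have hadd := dvd_add hi3 (dvd_refl (p : Int))
      simpa [hik] using hadd
    have hkdvd : p ∣ k := by exact_mod_cast hkdvdZ
    have hkpn : k + p ≤ l.length := by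
      obtain ⟨c, hc⟩ := hkdvd
      have hcp : c * p = k := by rw [Nat.mul_comm]; omega
      have hstep := pvMulStep hdvd (show c * p < l.length by omega)
      have hexp : (c + 1) * p = c * p + p := by ring
      omega
    rw [hik]
    simp only [beq_iff_eq, PySem.List.slice_natCast_add, PySem.List.slice_zero_start,
      PySem.List.slice_to_natCast, pvChunk_iff]
    intro r hr
    have hGk : pvGood l k := pvGood_of_dvd hg hkdvd
    have h2 := (hGk r (by omega)).symm
    have hidx : r + k = k + r := by omega
    rw [hidx] at h2
    exact h2

-- B's shift check is exactly pvGood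
theorem pvBChk_iff (l : List Int) (p : Nat) (hpn : p ≤ l.length) :
    pvBChk l p = true ↔ pvGood l p := by
  unfold pvBChk
  rw [beq_iff_eq, PySem.List.slice_from_natCast]
  have hsub : (l.length : Int) - (p : Int) = ((l.length - p : Nat) : Int) := by omega
  rw [hsub, PySem.List.slice_to_natCast]
  exact pvShift_iff l p hpn

-- A returns true iff some proper divisor period works
theorem pvA_iff (l : List Int) : getIsCyclingValues l = true ↔
    ∃ p : Nat, 1 ≤ p ∧ p < l.length ∧ p ∣ l.length ∧ pvGood l p := by
  unfold getIsCyclingValues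
  rw [List.any_eq_true]
  constructor
  · rintro ⟨i, hmem, hcond⟩
    rw [PySem.List.mem_pyRange_one] at hmem
    obtain ⟨h1, h2⟩ := hmem
    simp only [Bool.and_eq_true, beq_iff_eq, PySem.Int.mod_eq_zero_iff_dvd] at hcond
    obtain ⟨hdvdZ, hseg⟩ := hcond
    have hik : i = ((i.toNat : Nat) : Int) := by omega
    set p := i.toNat with hp
    have hdvd : p ∣ l.length := by
      rw [hik] at hdvdZ
      exact_mod_cast hdvdZ
    have hp1 : 1 ≤ p := by omega
    have hpn : p < l.length := by omega
    rw [hik] at hseg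
    exact ⟨p, hp1, hpn, hdvd, (pvASeg_iff l p hp1 hdvd).mp hseg⟩
  · rintro ⟨p, hp1, hpn, hdvd, hg⟩
    refine ⟨(p : Int), ?_, ?_⟩
    · rw [PySem.List.mem_pyRange_one]
      exact ⟨by exact_mod_cast hp1, by exact_mod_cast hpn⟩
    · simp only [Bool.and_eq_true, beq_iff_eq, PySem.Int.mod_eq_zero_iff_dvd]
      exact ⟨by exact_mod_cast hdvd, (pvASeg_iff l p hp1 hdvd).mpr hg⟩

-- facts about pvStrip
theorem pvStrip_pos {rem : Nat} (d : Nat) (hr : 0 < rem) : 0 < pvStrip rem d := by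
  induction rem using Nat.strong_induction_on with
  | _ rem ih =>
    rw [pvStrip]
    split
    · next h =>
      have hdvd : d ∣ rem := Nat.dvd_of_mod_eq_zero h.2.2
      have hpos : 0 < rem / d := Nat.div_pos (Nat.le_of_dvd h.2.1 hdvd) (by omega)
      exact ih _ (Nat.div_lt_self h.2.1 (by omega)) hpos
    · next h => exact hr

theorem pvStrip_dvd (rem d : Nat) : pvStrip rem d ∣ rem := by
  induction rem using Nat.strong_induction_on with
  | _ rem ih =>
    rw [pvStrip]
    split
    · next h =>
      have hdvd : d ∣ rem := Nat.dvd_of_mod_eq_zero h.2.2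
      have hstep : rem / d ∣ rem := ⟨d, (Nat.div_mul_cancel hdvd).symm⟩
      exact dvd_trans (ih _ (Nat.div_lt_self h.2.1 (by omega))) hstep
    · exact dvd_refl rem

theorem pvStrip_not_dvd {rem d : Nat} (hd : 2 ≤ d) (hr : 0 < rem) :
    ¬ d ∣ pvStrip rem d := by
  induction rem using Nat.strong_induction_on with
  | _ rem ih =>
    rw [pvStrip]
    split
    · next h =>
      have hdvd : d ∣ rem := Nat.dvd_of_mod_eq_zero h.2.2
      have hpos : 0 < rem / d := Nat.div_pos (Nat.le_of_dvd h.2.1 hdvd) (by omega)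
      exact ih _ (Nat.div_lt_self h.2.1 (by omega)) hpos
    · next h =>
      intro hdvd
      exact h ⟨hd, hr, Nat.mod_eq_zero_of_dvd hdvd⟩

theorem pvStrip_dvd_of_prime {rem d q : Nat} (hq : Nat.Prime q) (hqnd : ¬ q ∣ d)
    (hqr : q ∣ rem) : q ∣ pvStrip rem d := by
  induction rem using Nat.strong_induction_on with
  | _ rem ih =>
    rw [pvStrip]
    split
    · next h =>
      have hdvd : d ∣ rem := Nat.dvd_of_mod_eq_zero h.2.2
      have hsplit : q ∣ rem / d * d := by
        rw [Nat.div_mul_cancel hdvd]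
        exact hqr
      rcases (Nat.Prime.dvd_mul hq).mp hsplit with h1 | h2
      · exact ih _ (Nat.div_lt_self h.2.1 (by omega)) h1
      · exact absurd h2 hqnd
    · exact hqr

-- the smallest divisor ≥ 2 of rem is prime
theorem pvSmallest_prime {rem d : Nat} (hd : 2 ≤ d) (hdvd : d ∣ rem) (_hr : 0 < rem)
    (hmin : ∀ e, 2 ≤ e → e < d → ¬ e ∣ rem) : Nat.Prime d := by
  rw [Nat.prime_def_lt]
  refine ⟨hd, fun m hm hmd => ?_⟩
  by_contra hm1
  have hm0 : 0 < m := Nat.pos_of_dvd_of_pos hmd (by omega)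
  exact hmin m (by omega) hm (hmd.trans hdvd)

-- if no e < d divides rem and rem < d*d, then rem > 1 is prime
theorem pvEnd_prime {rem d : Nat} (h2 : 1 < rem) (hdd : rem < d * d)
    (hmin : ∀ e, 2 ≤ e → e < d → ¬ e ∣ rem) : Nat.Prime rem := by
  rw [Nat.prime_def_lt]
  refine ⟨h2, fun m hm hmd => ?_⟩
  by_contra hm1
  have hm0 : 0 < m := Nat.pos_of_dvd_of_pos hmd (by omega)
  have hm2 : 2 ≤ m := by omega
  obtain ⟨c, hc⟩ := hmd
  have hc2 : 2 ≤ c := by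
    rcases Nat.lt_or_ge c 2 with h | h
    · interval_cases c <;> omega
    · exact h
  have hcd : c ∣ rem := ⟨m, by rw [hc]; ring⟩
  rcases Nat.lt_or_ge m d with hmlt | hmge
  · exact hmin m hm2 hmlt ⟨c, hc⟩
  · have hclt : c < d := by
      rcases Nat.lt_or_ge c d with h | h
      · exact h
      · exfalso
        have := Nat.mul_le_mul hmge h
        omega
    exact hmin c hc2 hclt hcd

-- tail of the loop (d*d > rem): rem, if > 1, is the last prime factor
theorem pvTail_iff (l : List Int) (n rem d : Nat) (hr : 0 < rem) (hdd : rem < d * d)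
    (hmin : ∀ e, 2 ≤ e → e < d → ¬ e ∣ rem) :
    ((if 1 < rem then pvBChk l (n / rem) else false) = true ↔
      ∃ q, Nat.Prime q ∧ q ∣ rem ∧ pvBChk l (n / q) = true) := by
  by_cases h1 : 1 < rem
  · rw [if_pos h1]
    have hprime : Nat.Prime rem := pvEnd_prime h1 hdd hmin
    constructor
    · intro h
      exact ⟨rem, hprime, dvd_refl rem, h⟩
    · rintro ⟨q, hq, hqd, hchk⟩
      have heq : q = rem := (Nat.prime_dvd_prime_iff_eq hq hprime).mp hqd
      rw [← heq]
      exact hchk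
  · rw [if_neg h1]
    constructor
    · intro h
      exact Bool.noConfusion h
    · rintro ⟨q, hq, hqd, -⟩
      exfalso
      have hrem1 : rem = 1 := by omega
      rw [hrem1] at hqd
      have := Nat.dvd_one.mp hqd
      have := hq.two_le
      omega

-- characterization of B's factorization loop
theorem pvBLoop_iff (l : List Int) (n : Nat) : ∀ fuel rem d : Nat, rem + 1 - d ≤ fuel →
    0 < rem → 2 ≤ d → (∀ e, 2 ≤ e → e < d → ¬ e ∣ rem) →
    (pvBLoop l n rem d = true ↔
      ∃ q, Nat.Prime q ∧ q ∣ rem ∧ pvBChk l (n / q) = true) := by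
  intro fuel
  induction fuel with
  | zero =>
    intro rem d hfuel hr hd hmin
    rw [pvBLoop]
    have hcond : ¬ d * d ≤ rem := by
      intro hc
      have hself : d ≤ d * d := Nat.le_mul_of_pos_right d (by omega)
      omega
    rw [dif_neg hcond]
    exact pvTail_iff l n rem d hr (by omega) hmin
  | succ fuel ih =>
    intro rem d hfuel hr hd hmin
    rw [pvBLoop]
    by_cases hc : d * d ≤ rem
    · rw [dif_pos hc]
      have hdrem : d ≤ rem := le_trans (Nat.le_mul_of_pos_right d (by omega)) hc
      by_cases hmod : rem % d = 0
      · rw [if_pos hmod]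
        have hdvd : d ∣ rem := Nat.dvd_of_mod_eq_zero hmod
        have hdprime : Nat.Prime d := pvSmallest_prime hd hdvd hr hmin
        by_cases hchk : pvBChk l (n / d) = true
        · rw [if_pos hchk]
          exact ⟨fun _ => ⟨d, hdprime, hdvd, hchk⟩, fun _ => rfl⟩
        · rw [if_neg hchk]
          have hspos : 0 < pvStrip rem d := pvStrip_pos d hr
          have hsle := pvStrip_le rem d
          have hsdvd := pvStrip_dvd rem d
          rw [ih (pvStrip rem d) (d + 1) (by omega) hspos (by omega) ?hmin']
          case hmin' =>
            intro e he helt hedvd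
            rcases Nat.lt_or_ge e d with h1 | h2
            · exact hmin e he h1 (hedvd.trans hsdvd)
            · have heq : e = d := by omega
              rw [heq] at hedvd
              exact pvStrip_not_dvd hd hr hedvd
          constructor
          · rintro ⟨q, hq, hqd, hqchk⟩
            exact ⟨q, hq, hqd.trans hsdvd, hqchk⟩
          · rintro ⟨q, hq, hqd, hqchk⟩
            refine ⟨q, hq, ?_, hqchk⟩
            have hqne : q ≠ d := by
              intro heq
              rw [heq] at hqchk
              exact hchk hqchk
            have hqnd : ¬ q ∣ d :=
              fun hdv => hqne ((Nat.prime_dvd_prime_iff_eq hq hdprime).mp hdv)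
            exact pvStrip_dvd_of_prime hq hqnd hqd
      · rw [if_neg hmod]
        rw [ih rem (d + 1) (by omega) hr (by omega) ?hmin']
        case hmin' =>
          intro e he helt hedvd
          rcases Nat.lt_or_ge e d with h1 | h2
          · exact hmin e he h1 hedvd
          · have heq : e = d := by omega
            rw [heq] at hedvd
            exact hmod (Nat.mod_eq_zero_of_dvd hedvd)
    · rw [dif_neg hc]
      exact pvTail_iff l n rem d hr (by omega) hmin

-- B returns true iff some prime factor q of n yields period n/q
theorem pvB_iff (l : List Int) : getIsCyclingValues_alt l = true ↔
    (2 ≤ l.length ∧ ∃ q, Nat.Prime q ∧ q ∣ l.length ∧ pvGood l (l.length / q)) := by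
  unfold getIsCyclingValues_alt
  by_cases h : l.length < 2
  · rw [if_pos h]
    constructor
    · intro hh
      exact Bool.noConfusion hh
    · rintro ⟨h2, -⟩
      omega
  · rw [if_neg h]
    rw [pvBLoop_iff l l.length (l.length + 1) l.length 2 (by omega) (by omega) (by omega)
      (fun e he helt hdvd => by omega)]
    constructor
    · rintro ⟨q, hq, hqd, hchk⟩
      exact ⟨by omega, q, hq, hqd,
        (pvBChk_iff l (l.length / q) (Nat.div_le_self _ _)).mp hchk⟩
    · rintro ⟨-, q, hq, hqd, hg⟩
      exact ⟨q, hq, hqd, (pvBChk_iff l (l.length / q) (Nat.div_le_self _ _)).mpr hg⟩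

-- the two candidate sets find a working period in the same cases
theorem pvMain (l : List Int) :
    (∃ p : Nat, 1 ≤ p ∧ p < l.length ∧ p ∣ l.length ∧ pvGood l p) ↔
    (2 ≤ l.length ∧ ∃ q, Nat.Prime q ∧ q ∣ l.length ∧ pvGood l (l.length / q)) := by
  constructor
  · rintro ⟨p, hp1, hpn, hdvd, hg⟩
    have hn2 : 2 ≤ l.length := by omega
    set k := l.length / p with hk
    have hnk : l.length = p * k := by
      rw [hk, Nat.mul_comm]
      exact (Nat.div_mul_cancel hdvd).symm
    have hk2 : 2 ≤ k := by
      rcases Nat.lt_or_ge k 2 with h | h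
      · exfalso
        interval_cases k <;> omega
      · exact h
    set q := Nat.minFac k with hq
    have hqprime : Nat.Prime q := Nat.minFac_prime (by omega)
    obtain ⟨t, htk⟩ := Nat.minFac_dvd k
    have hqn : q ∣ l.length := ⟨p * t, by rw [hnk, htk]; ring⟩
    have hmn : l.length = q * (l.length / q) := by
      rw [Nat.mul_comm]
      exact (Nat.div_mul_cancel hqn).symm
    have hmpt : l.length / q = p * t := by
      have heq : q * (l.length / q) = q * (p * t) := by rw [← hmn, hnk, htk]; ring
      exact Nat.eq_of_mul_eq_mul_left (by have := hqprime.two_le; omega) heq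
    exact ⟨hn2, q, hqprime, hqn, pvGood_of_dvd hg ⟨t, hmpt⟩⟩
  · rintro ⟨hn2, q, hq, hqd, hg⟩
    have hq2 := hq.two_le
    have hqle : q ≤ l.length := Nat.le_of_dvd (by omega) hqd
    refine ⟨l.length / q, ?_, Nat.div_lt_self (by omega) (by omega), ?_, hg⟩
    · rw [Nat.one_le_div_iff (by omega)]
      exact hqle
    · exact ⟨q, (Nat.div_mul_cancel hqd).symm⟩

-- ===== VERDICT (by name: the statement is the Claim_ definition above) =====
theorem getIsCyclingValues_spec : Claim_equal_getIsCyclingValues := by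
  intro l _
  unfold Spec_getIsCyclingValues
  rw [Bool.eq_iff_iff]
  exact (pvA_iff l).trans ((pvMain l).trans (pvB_iff l).symm)
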